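-- pv_equiv track=rewrite | github.com/gp-somni-labs/somni-property | backend/services/mcp_powered_ai.py | _generate_suggestions_from_results
-- ===== SOURCE A (Python) =====
-- from typing import Dict, List, Optional, Any
--
-- def _generate_suggestions_from_results(
--
--     tool_plan: Dict,
--     tool_results: List[Dict]
-- ) -> List[str]:
--     """
--     Generate contextual suggestions based on tool results
--     """
--     intent = tool_plan.get("intent", "")
--     tools_used = [t["tool"] for t in tool_results]
--
--     # Contextual suggestions based on what was just queried
--     if "list_properties" in tools_used:
--         return ["Show property details", "Compare performance", "View vacant units"]
--     elif "list_work_orders" in tools_used: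
--         return ["Create new work order", "Assign contractor", "View high priority"]
--     elif "list_tenants" in tools_used:
--         return ["View lease details", "Check payment history", "Send communication"]
--     elif "create_work_order" in tools_used:
--         return ["Assign contractor", "Set priority", "View all work orders"]
--     elif "list_smart_devices" in tools_used:
--         return ["Control device", "Run diagnostics", "View device history"]
--     else:
--         return ["Show more", "Export data", "Ask another question"]
-- ===== SOURCE B (Python) =====
-- _PRIORITY = {
--     "list_properties": 0,
--     "list_work_orders": 1,
--     "list_tenants": 2,
--     "create_work_order": 3,
--     "list_smart_devices": 4,
-- }
--
-- _SUGGESTIONS = [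
--     ["Show property details", "Compare performance", "View vacant units"],
--     ["Create new work order", "Assign contractor", "View high priority"],
--     ["View lease details", "Check payment history", "Send communication"],
--     ["Assign contractor", "Set priority", "View all work orders"],
--     ["Control device", "Run diagnostics", "View device history"],
--     ["Show more", "Export data", "Ask another question"],
-- ]
--
-- def _generate_suggestions_from_results(
--     tool_plan,
--     tool_results
-- ):
--     # Single pass: track the highest-priority (lowest-rank) recognised tool seen.
--     best = 5
--     for t in tool_results:
--         best = min(best, _PRIORITY.get(t["tool"], 5))
--     return _SUGGESTIONS[best]
-- ===== Notes on version B (the rewrite author's own statement) =====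
-- stated objective: alternative
-- what changed: Replaces the five membership tests over a tools_used list with a single pass over tool_results that folds a minimum priority rank and indexes a suggestion table with it (the unused intent lookup is dropped).
import Mathlib
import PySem

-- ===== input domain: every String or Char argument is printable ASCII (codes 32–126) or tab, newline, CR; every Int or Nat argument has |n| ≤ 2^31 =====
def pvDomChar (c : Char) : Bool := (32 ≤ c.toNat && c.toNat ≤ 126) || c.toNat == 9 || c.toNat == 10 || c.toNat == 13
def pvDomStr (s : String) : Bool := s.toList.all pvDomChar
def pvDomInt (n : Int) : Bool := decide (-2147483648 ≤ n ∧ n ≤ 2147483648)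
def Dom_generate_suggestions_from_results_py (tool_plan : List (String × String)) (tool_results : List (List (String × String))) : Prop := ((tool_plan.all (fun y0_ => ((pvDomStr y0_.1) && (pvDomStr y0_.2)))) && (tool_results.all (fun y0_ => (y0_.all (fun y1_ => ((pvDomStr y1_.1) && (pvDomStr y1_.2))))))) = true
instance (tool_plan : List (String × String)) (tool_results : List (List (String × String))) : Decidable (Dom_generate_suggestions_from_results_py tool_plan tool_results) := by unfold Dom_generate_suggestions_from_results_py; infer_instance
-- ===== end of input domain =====

-- B folds a minimum priority rank in one pass over tool_results and indexes a table, instead of A's five membership tests; equivalence under Pre_ (every result dict has key "tool").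


-- ===== PORT A =====
-- t["tool"] raises KeyError when absent; under Pre_ the key is present, so the getD "" default is never used.
def generate_suggestions_from_results_py (tool_plan : List (String × String)) (tool_results : List (List (String × String))) : List String :=
  let _intent := (PySem.Dict.mk tool_plan).getD "intent" ""
  let tools_used := tool_results.map (fun t => ((PySem.Dict.mk t).get? "tool").getD "")
  if tools_used.contains "list_properties" then
    ["Show property details", "Compare performance", "View vacant units"]
  else if tools_used.contains "list_work_orders" then
    ["Create new work order", "Assign contractor", "View high priority"]
  else if tools_used.contains "list_tenants" then
    ["View lease details", "Check payment history", "Send communication"]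
  else if tools_used.contains "create_work_order" then
    ["Assign contractor", "Set priority", "View all work orders"]
  else if tools_used.contains "list_smart_devices" then
    ["Control device", "Run diagnostics", "View device history"]
  else
    ["Show more", "Export data", "Ask another question"]

-- ===== PORT B =====
-- _PRIORITY.get(s, 5): lookup in the literal priority dict with default 5.
def pvRank (s : String) : Nat :=
  (PySem.Dict.mk [("list_properties", 0), ("list_work_orders", 1), ("list_tenants", 2),
                  ("create_work_order", 3), ("list_smart_devices", 4)]).getD s 5

def pvSuggTable : List (List String) :=
  [ ["Show property details", "Compare performance", "View vacant units"],
    ["Create new work order", "Assign contractor", "View high priority"],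
    ["View lease details", "Check payment history", "Send communication"],
    ["Assign contractor", "Set priority", "View all work orders"],
    ["Control device", "Run diagnostics", "View device history"],
    ["Show more", "Export data", "Ask another question"] ]

-- _SUGGESTIONS[best]: best is always ≤ 5 and the table has 6 entries, so pyGet? is some; [] is unreachable.
def generate_suggestions_from_results_py_alt (tool_plan : List (String × String)) (tool_results : List (List (String × String))) : List String :=
  let best := tool_results.foldl (fun b t => min b (pvRank (((PySem.Dict.mk t).get? "tool").getD ""))) 5
  match PySem.List.pyGet? pvSuggTable (Int.ofNat best) with
  | some v => v
  | none => []

-- ===== PRECONDITION & SPEC =====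
-- Pre_ excludes inputs where some tool_results dict lacks the key "tool": there Python A raises KeyError (and B raises too).
def Pre_generate_suggestions_from_results_py (tool_plan : List (String × String)) (tool_results : List (List (String × String))) : Prop :=
  ∀ t ∈ tool_results, "tool" ∈ t.map (·.1)
instance (tool_plan : List (String × String)) (tool_results : List (List (String × String))) : Decidable (Pre_generate_suggestions_from_results_py tool_plan tool_results) := by unfold Pre_generate_suggestions_from_results_py; infer_instance
def pvWitness_generate_suggestions_from_results_py : (List (String × String)) × (List (List (String × String))) :=
  ([("intent", "view")], [[("tool", "list_tenants")]])
def Spec_generate_suggestions_from_results_py (tool_plan : List (String × String)) (tool_results : List (List (String × String))) (out : List String) : Prop := out = generate_suggestions_from_results_py_alt tool_plan tool_results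
instance (tool_plan : List (String × String)) (tool_results : List (List (String × String))) (out : List String) : Decidable (Spec_generate_suggestions_from_results_py tool_plan tool_results out) := by unfold Spec_generate_suggestions_from_results_py; infer_instance

-- ===== CLAIM (what is proved, stated in full; the proofs are below) =====
def Claim_equal_generate_suggestions_from_results_py : Prop := ∀ (tool_plan : List (String × String)) (tool_results : List (List (String × String))), Dom_generate_suggestions_from_results_py tool_plan tool_results → Pre_generate_suggestions_from_results_py tool_plan tool_results → Spec_generate_suggestions_from_results_py tool_plan tool_results (generate_suggestions_from_results_py tool_plan tool_results)

-- ===== LEMMAS AND PROOFS =====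

-- the rank A's elif chain effectively selects
def pvChainRank (tu : List String) : Nat :=
  if tu.contains "list_properties" then 0
  else if tu.contains "list_work_orders" then 1
  else if tu.contains "list_tenants" then 2
  else if tu.contains "create_work_order" then 3
  else if tu.contains "list_smart_devices" then 4
  else 5

theorem pvChainRank_le (tu : List String) : pvChainRank tu ≤ 5 := by
  unfold pvChainRank; split_ifs <;> omega

theorem pvChainRank_cons (t : String) (tu : List String) :
    pvChainRank (t :: tu) = min (pvRank t) (pvChainRank tu) := by
  have h5 := pvChainRank_le tu
  by_cases h0 : t = "list_properties"
  · subst h0; simp [pvChainRank, pvRank, PySem.Dict.getD, PySem.Dict.get?]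
  · by_cases h1 : t = "list_work_orders"
    · subst h1; simp [pvChainRank, pvRank, PySem.Dict.getD, PySem.Dict.get?]
      split_ifs <;> omega
    · by_cases h2 : t = "list_tenants"
      · subst h2; simp [pvChainRank, pvRank, PySem.Dict.getD, PySem.Dict.get?]
        split_ifs <;> omega
      · by_cases h3 : t = "create_work_order"
        · subst h3; simp [pvChainRank, pvRank, PySem.Dict.getD, PySem.Dict.get?]
          split_ifs <;> omega
        · by_cases h4 : t = "list_smart_devices"
          · subst h4; simp [pvChainRank, pvRank, PySem.Dict.getD, PySem.Dict.get?]
            split_ifs <;> omega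
          · have hr : pvRank t = 5 := by
              simp [pvRank, PySem.Dict.getD, PySem.Dict.get?, List.find?,
                beq_eq_false_iff_ne.mpr (Ne.symm h0), beq_eq_false_iff_ne.mpr (Ne.symm h1),
                beq_eq_false_iff_ne.mpr (Ne.symm h2), beq_eq_false_iff_ne.mpr (Ne.symm h3),
                beq_eq_false_iff_ne.mpr (Ne.symm h4)]
            have hc : pvChainRank (t :: tu) = pvChainRank tu := by
              simp [pvChainRank, List.contains_cons, Ne.symm h0, Ne.symm h1, Ne.symm h2, Ne.symm h3, Ne.symm h4]
            rw [hc, hr]; omega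

theorem pvFold_eq (tu : List String) (b : Nat) (hb : b ≤ 5) :
    tu.foldl (fun b t => min b (pvRank t)) b = min b (pvChainRank tu) := by
  induction tu generalizing b with
  | nil => simp [pvChainRank]; omega
  | cons t tu ih =>
    simp only [List.foldl_cons, ih (min b (pvRank t)) (by omega), pvChainRank_cons]
    omega

theorem pvChain_idx (tu : List String) :
    (if tu.contains "list_properties" then
      ["Show property details", "Compare performance", "View vacant units"]
    else if tu.contains "list_work_orders" then
      ["Create new work order", "Assign contractor", "View high priority"]
    else if tu.contains "list_tenants" then
      ["View lease details", "Check payment history", "Send communication"]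
    else if tu.contains "create_work_order" then
      ["Assign contractor", "Set priority", "View all work orders"]
    else if tu.contains "list_smart_devices" then
      ["Control device", "Run diagnostics", "View device history"]
    else
      ["Show more", "Export data", "Ask another question"]) =
    (match PySem.List.pyGet? pvSuggTable (Int.ofNat (pvChainRank tu)) with
     | some v => v
     | none => []) := by
  unfold pvChainRank
  split_ifs <;> rfl

-- ===== VERDICT (by name: the statement is the Claim_ definition above) =====
theorem generate_suggestions_from_results_py_spec : Claim_equal_generate_suggestions_from_results_py := by
  intro tool_plan tool_results _ _
  unfold Spec_generate_suggestions_from_results_py generate_suggestions_from_results_py generate_suggestions_from_results_py_alt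
  have hmap : tool_results.foldl (fun b t => min b (pvRank (((PySem.Dict.mk t).get? "tool").getD ""))) 5
      = (tool_results.map (fun t => ((PySem.Dict.mk t).get? "tool").getD "")).foldl (fun b t => min b (pvRank t)) 5 := by
    rw [List.foldl_map]
  simp only [hmap, pvFold_eq _ 5 (by omega)]
  have h5 := pvChainRank_le (tool_results.map (fun t => ((PySem.Dict.mk t).get? "tool").getD ""))
  rw [show min 5 (pvChainRank (tool_results.map (fun t => ((PySem.Dict.mk t).get? "tool").getD ""))) = pvChainRank (tool_results.map (fun t => ((PySem.Dict.mk t).get? "tool").getD "")) by omega]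
  exact pvChain_idx _
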